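-- pv_equiv track=rewrite | github.com/saulin18/code-challenges-technical-tests | lambdas.py | rearrange_positives_and_negatives
-- ===== SOURCE A (Python) =====
-- def rearrange_positives_and_negatives(arr: list[int]) -> list[int]:
--     positives = list(filter(lambda x: x > 0, arr))
--     negatives = list(filter(lambda x: x < 0, arr))
--
--     res = []
--     for index in range(len(positives)):
--         res.append(positives[index])
--         if index < len(negatives):
--             res.append(negatives[index])
--
--     return res
-- ===== SOURCE B (Python) =====
-- def rearrange_positives_and_negatives(arr: list[int]) -> list[int]:
--     # Two cursors walk the original array directly: each round finds the next
--     # positive by scanning forward, emits it, then finds and emits the next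
--     # negative if one remains. No filtered intermediate lists are built.
--     res = []
--     i = j = 0
--     n = len(arr)
--     while True:
--         while i < n and arr[i] <= 0:
--             i += 1
--         if i >= n:
--             break
--         res.append(arr[i])
--         i += 1
--         while j < n and arr[j] >= 0:
--             j += 1
--         if j < n:
--             res.append(arr[j])
--             j += 1
--     return res
-- ===== Notes on version B (the rewrite author's own statement) =====
-- stated objective: alternative
-- what changed: Replaces A's two staged filter passes plus an index loop over the positives list by a single in-place two-cursor scan of the original array: one cursor advances to the next positive, the other to the next negative, emitting them alternately; no intermediate filtered lists are built.
import Mathlib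
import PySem

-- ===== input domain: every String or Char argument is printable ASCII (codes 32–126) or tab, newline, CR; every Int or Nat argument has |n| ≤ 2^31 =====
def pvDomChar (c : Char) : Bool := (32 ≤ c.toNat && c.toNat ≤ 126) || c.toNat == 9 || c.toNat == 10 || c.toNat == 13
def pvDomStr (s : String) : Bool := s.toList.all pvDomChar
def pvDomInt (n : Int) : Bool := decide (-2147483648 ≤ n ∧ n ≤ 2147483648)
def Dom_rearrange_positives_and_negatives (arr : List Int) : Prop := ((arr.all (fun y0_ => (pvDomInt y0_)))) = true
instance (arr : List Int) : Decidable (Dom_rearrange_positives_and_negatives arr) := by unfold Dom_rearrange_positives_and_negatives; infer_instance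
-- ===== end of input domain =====

-- B replaces A's filter-then-index-loop by a single two-cursor scan of the original array (alternative decomposition; equal return values proved below).


-- ===== PORT A =====
def rearrange_positives_and_negatives (arr : List Int) : List Int :=
  let positives := arr.filter (fun x => x > 0)
  let negatives := arr.filter (fun x => x < 0)
  (PySem.List.pyRange 0 (positives.length : Int) 1).foldl
    (fun res index =>
      let res := res ++ [PySem.List.pyGetD positives index 0]
      if index < (negatives.length : Int) then res ++ [PySem.List.pyGetD negatives index 0]
      else res)
    []

-- ===== PORT B =====
-- inner `while i < n and arr[i] <= 0: i += 1`: structural recursion on the suffix arr[i:]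
def pvSkipNonPosGo : List Int → Nat → Nat
  | [], i => i
  | x :: xs, i => if x ≤ 0 then pvSkipNonPosGo xs (i + 1) else i

def pvSkipNonPos (arr : List Int) (i : Nat) : Nat := pvSkipNonPosGo (arr.drop i) i

-- inner `while j < n and arr[j] >= 0: j += 1`
def pvSkipNonNegGo : List Int → Nat → Nat
  | [], j => j
  | x :: xs, j => if 0 ≤ x then pvSkipNonNegGo xs (j + 1) else j

def pvSkipNonNeg (arr : List Int) (j : Nat) : Nat := pvSkipNonNegGo (arr.drop j) j

-- the outer `while True` loop of Source B; fuel only makes the recursion structural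
def pvBLoop (arr : List Int) : Nat → Nat → List Int → Nat → List Int
  | _, _, res, 0 => res
  | i, j, res, fuel + 1 =>
    if h : pvSkipNonPos arr i < arr.length then
      if h2 : pvSkipNonNeg arr j < arr.length then
        pvBLoop arr (pvSkipNonPos arr i + 1) (pvSkipNonNeg arr j + 1)
          (res ++ [arr[pvSkipNonPos arr i]] ++ [arr[pvSkipNonNeg arr j]]) fuel
      else
        pvBLoop arr (pvSkipNonPos arr i + 1) (pvSkipNonNeg arr j)
          (res ++ [arr[pvSkipNonPos arr i]]) fuel
    else res

def rearrange_positives_and_negatives_alt (arr : List Int) : List Int :=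
  pvBLoop arr 0 0 [] (arr.length + 1)

-- ===== PRECONDITION & SPEC =====
def Spec_rearrange_positives_and_negatives (arr : List Int) (out : List Int) : Prop := out = rearrange_positives_and_negatives_alt arr
instance (arr : List Int) (out : List Int) : Decidable (Spec_rearrange_positives_and_negatives arr out) := by unfold Spec_rearrange_positives_and_negatives; infer_instance

-- ===== CLAIM (what is proved, stated in full; the proofs are below) =====
def Claim_equal_rearrange_positives_and_negatives : Prop := ∀ (arr : List Int), Dom_rearrange_positives_and_negatives arr → Spec_rearrange_positives_and_negatives arr (rearrange_positives_and_negatives arr)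

-- ===== LEMMAS AND PROOFS =====

-- Common value both programs compute: interleave positives with negatives,
-- appending leftover positives alone, dropping leftover negatives.
def pvInter : List Int → List Int → List Int
  | [], _ => []
  | p :: ps, [] => p :: pvInter ps []
  | p :: ps, m :: ns => p :: m :: pvInter ps ns

-- ---- facts about the cursor-advancing helpers ----

theorem drop_succ_of_drop_cons {arr xs : List Int} {x : Int} {i : Nat}
    (hl : arr.drop i = x :: xs) : arr.drop (i + 1) = xs := by
  have h1 := congrArg (List.drop 1) hl
  simpa [List.drop_drop, Nat.add_comm] using h1

theorem getElem_of_drop_cons {arr xs : List Int} {x : Int} {i : Nat}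
    (hl : arr.drop i = x :: xs) (h : i < arr.length) : arr[i] = x := by
  have h0 : (arr.drop i)[0]? = some x := by rw [hl]; rfl
  rw [List.getElem?_drop, Nat.add_zero, List.getElem?_eq_getElem h] at h0
  exact Option.some.inj h0

theorem pvSkipNonPosGo_le (l : List Int) (i : Nat) : i ≤ pvSkipNonPosGo l i := by
  induction l generalizing i with
  | nil => exact Nat.le_refl i
  | cons x xs ih =>
    unfold pvSkipNonPosGo
    split
    · exact Nat.le_trans (Nat.le_succ i) (ih (i + 1))
    · exact Nat.le_refl i

theorem pvSkipNonPosGo_filter (arr : List Int) (l : List Int) (i : Nat) (hl : arr.drop i = l) :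
    (arr.drop (pvSkipNonPosGo l i)).filter (fun x => x > 0)
      = (arr.drop i).filter (fun x => x > 0) := by
  induction l generalizing i with
  | nil => rfl
  | cons x xs ih =>
    unfold pvSkipNonPosGo
    split
    · next hle =>
      rw [ih (i + 1) (drop_succ_of_drop_cons hl), hl, List.filter_cons,
          drop_succ_of_drop_cons hl]
      have : ¬ (x > 0) := by omega
      simp [this]
    · rfl

theorem pvSkipNonNegGo_filter (arr : List Int) (l : List Int) (j : Nat) (hl : arr.drop j = l) :
    (arr.drop (pvSkipNonNegGo l j)).filter (fun x => x < 0)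
      = (arr.drop j).filter (fun x => x < 0) := by
  induction l generalizing j with
  | nil => rfl
  | cons x xs ih =>
    unfold pvSkipNonNegGo
    split
    · next hle =>
      rw [ih (j + 1) (drop_succ_of_drop_cons hl), hl, List.filter_cons,
          drop_succ_of_drop_cons hl]
      have : ¬ (x < 0) := by omega
      simp [this]
    · rfl

theorem pvSkipNonPosGo_pos (arr : List Int) (l : List Int) (i : Nat) (hl : arr.drop i = l) :
    ∀ h : pvSkipNonPosGo l i < arr.length, 0 < arr[pvSkipNonPosGo l i] := by
  induction l generalizing i with
  | nil =>
    intro h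
    have : arr.length ≤ i := by
      by_contra hc
      have : arr.drop i ≠ [] := by simp; omega
      exact this hl
    simp only [pvSkipNonPosGo] at h
    omega
  | cons x xs ih =>
    unfold pvSkipNonPosGo
    split
    · exact ih (i + 1) (drop_succ_of_drop_cons hl)
    · next hnle =>
      intro h
      rw [getElem_of_drop_cons hl h]
      omega

theorem pvSkipNonNegGo_neg (arr : List Int) (l : List Int) (j : Nat) (hl : arr.drop j = l) :
    ∀ h : pvSkipNonNegGo l j < arr.length, arr[pvSkipNonNegGo l j] < 0 := by
  induction l generalizing j with
  | nil =>
    intro h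
    have : arr.length ≤ j := by
      by_contra hc
      have : arr.drop j ≠ [] := by simp; omega
      exact this hl
    simp only [pvSkipNonNegGo] at h
    omega
  | cons x xs ih =>
    unfold pvSkipNonNegGo
    split
    · exact ih (j + 1) (drop_succ_of_drop_cons hl)
    · next hnle =>
      intro h
      rw [getElem_of_drop_cons hl h]
      omega

theorem pvSkipNonPos_le (arr : List Int) (i : Nat) : i ≤ pvSkipNonPos arr i :=
  pvSkipNonPosGo_le _ _

theorem pvSkipNonPos_filter (arr : List Int) (i : Nat) :
    (arr.drop (pvSkipNonPos arr i)).filter (fun x => x > 0)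
      = (arr.drop i).filter (fun x => x > 0) :=
  pvSkipNonPosGo_filter arr _ i rfl

theorem pvSkipNonNeg_filter (arr : List Int) (j : Nat) :
    (arr.drop (pvSkipNonNeg arr j)).filter (fun x => x < 0)
      = (arr.drop j).filter (fun x => x < 0) :=
  pvSkipNonNegGo_filter arr _ j rfl

theorem pvSkipNonPos_pos (arr : List Int) (i : Nat) :
    ∀ h : pvSkipNonPos arr i < arr.length, 0 < arr[pvSkipNonPos arr i] :=
  pvSkipNonPosGo_pos arr _ i rfl

theorem pvSkipNonNeg_neg (arr : List Int) (j : Nat) :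
    ∀ h : pvSkipNonNeg arr j < arr.length, arr[pvSkipNonNeg arr j] < 0 :=
  pvSkipNonNegGo_neg arr _ j rfl

-- ---- B side: the two-cursor loop computes pvInter of the remaining filtered suffixes ----

theorem pvBLoop_eq (arr : List Int) (fuel : Nat) :
    ∀ (i j : Nat) (res : List Int), arr.length - i < fuel →
    pvBLoop arr i j res fuel
      = res ++ pvInter ((arr.drop i).filter (fun x => x > 0))
                       ((arr.drop j).filter (fun x => x < 0)) := by
  induction fuel with
  | zero => intro i j res hf; omega
  | succ fuel ih =>
    intro i j res hf
    unfold pvBLoop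
    split
    · next h =>
      have hle := pvSkipNonPos_le arr i
      have hp : (arr.drop i).filter (fun x => x > 0)
          = arr[pvSkipNonPos arr i] :: (arr.drop (pvSkipNonPos arr i + 1)).filter (fun x => x > 0) := by
        rw [← pvSkipNonPos_filter arr i, List.drop_eq_getElem_cons h, List.filter_cons]
        have := pvSkipNonPos_pos arr i h
        simp [this]
      split
      · next h2 =>
        have hn : (arr.drop j).filter (fun x => x < 0)
            = arr[pvSkipNonNeg arr j] :: (arr.drop (pvSkipNonNeg arr j + 1)).filter (fun x => x < 0) := by
          rw [← pvSkipNonNeg_filter arr j, List.drop_eq_getElem_cons h2, List.filter_cons]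
          have := pvSkipNonNeg_neg arr j h2
          simp [this]
        rw [ih _ _ _ (by omega), hp, hn, pvInter]
        simp
      · next h2 =>
        have hn : (arr.drop j).filter (fun x => x < 0) = [] := by
          rw [← pvSkipNonNeg_filter arr j, List.drop_eq_nil_iff.mpr (by omega), List.filter_nil]
        have hn' : (arr.drop (pvSkipNonNeg arr j)).filter (fun x => x < 0) = [] := by
          rw [List.drop_eq_nil_iff.mpr (by omega), List.filter_nil]
        rw [ih _ _ _ (by omega), hp, hn, hn', pvInter]
        simp
    · next h =>
      have hp : (arr.drop i).filter (fun x => x > 0) = [] := by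
        rw [← pvSkipNonPos_filter arr i, List.drop_eq_nil_iff.mpr (by omega), List.filter_nil]
      rw [hp, pvInter]
      simp

-- ---- A side: the index-driven fold computes pvInter of the filtered lists ----

theorem flatMap_eq_inter (ps ns : List Int) :
    (List.range ps.length).flatMap
      (fun k => ps.getD k 0 :: (if k < ns.length then [ns.getD k 0] else []))
    = pvInter ps ns := by
  induction ps generalizing ns with
  | nil => simp [pvInter]
  | cons p ps ih =>
    rw [List.length_cons, List.range_succ_eq_map, List.flatMap_cons, List.flatMap_map]
    cases ns with
    | nil =>
      rw [pvInter, ← ih []]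
      simp
    | cons m ns =>
      rw [pvInter, ← ih ns]
      simp

theorem fold_eq (ps ns : List Int) :
    (PySem.List.pyRange 0 (ps.length : Int) 1).foldl
      (fun res index =>
        let res := res ++ [PySem.List.pyGetD ps index 0]
        if index < (ns.length : Int) then res ++ [PySem.List.pyGetD ns index 0] else res) []
    = pvInter ps ns := by
  have hbody : (fun (res : List Int) (index : Int) =>
      let res := res ++ [PySem.List.pyGetD ps index 0]
      if index < (ns.length : Int) then res ++ [PySem.List.pyGetD ns index 0] else res)
      = (fun res index => res ++
          (PySem.List.pyGetD ps index 0 ::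
            (if index < (ns.length : Int) then [PySem.List.pyGetD ns index 0] else []))) := by
    funext res index
    by_cases h : index < (ns.length : Int) <;> simp [h]
  rw [hbody, PySem.List.foldl_append_eq_flatMap, PySem.List.pyRange_one, List.flatMap_map]
  simp only [List.nil_append, Int.sub_zero, Int.toNat_natCast]
  refine Eq.trans ?_ (flatMap_eq_inter ps ns)
  congr 1
  funext k
  simp [Nat.cast_lt]

-- ===== VERDICT (by name: the statement is the Claim_ definition above) =====
theorem rearrange_positives_and_negatives_spec : Claim_equal_rearrange_positives_and_negatives := by
  intro arr _
  unfold Spec_rearrange_positives_and_negatives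
  simp only [rearrange_positives_and_negatives, rearrange_positives_and_negatives_alt]
  rw [fold_eq, pvBLoop_eq arr (arr.length + 1) 0 0 [] (by omega)]
  simp
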